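-- pv_equiv track=rewrite | github.com/marttottdc/moio_greenfield | backend/agent_console/runtime/backend.py | _last_interactions
-- ===== SOURCE A (Python) =====
-- def _last_interactions(items: list[dict[str, str]], interaction_count: int) -> list[dict[str, str]]:
--     if not items:
--         return []
--     count = max(1, int(interaction_count))
--     user_indexes = [index for index, item in enumerate(items) if item.get("role") == "user"]
--     if not user_indexes:
--         keep_messages = min(len(items), count * 2)
--         return items[-keep_messages:]
--
--     start_user_pos = max(0, len(user_indexes) - count)
--     start_index = user_indexes[start_user_pos]
--     return items[start_index:]
-- ===== SOURCE B (Python) =====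
-- def _last_interactions(items: list[dict[str, str]], interaction_count: int) -> list[dict[str, str]]:
--     if not items:
--         return []
--     count = max(1, int(interaction_count))
--     remaining = count
--     start = None
--     for i in range(len(items) - 1, -1, -1):
--         if items[i].get("role") == "user":
--             start = i
--             remaining -= 1
--             if remaining == 0:
--                 break
--     if start is None:
--         return items[len(items) - min(len(items), count * 2):]
--     return items[start:]
-- ===== Notes on version B (the rewrite author's own statement) =====
-- stated objective: alternative
-- what changed: Replaces A's full forward pass that materializes the list of all user indexes (enumerate+comprehension, then index arithmetic into it) with a single backward scan keeping only a countdown and a candidate start index, breaking early at the count-th user from the end.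
import Mathlib
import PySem

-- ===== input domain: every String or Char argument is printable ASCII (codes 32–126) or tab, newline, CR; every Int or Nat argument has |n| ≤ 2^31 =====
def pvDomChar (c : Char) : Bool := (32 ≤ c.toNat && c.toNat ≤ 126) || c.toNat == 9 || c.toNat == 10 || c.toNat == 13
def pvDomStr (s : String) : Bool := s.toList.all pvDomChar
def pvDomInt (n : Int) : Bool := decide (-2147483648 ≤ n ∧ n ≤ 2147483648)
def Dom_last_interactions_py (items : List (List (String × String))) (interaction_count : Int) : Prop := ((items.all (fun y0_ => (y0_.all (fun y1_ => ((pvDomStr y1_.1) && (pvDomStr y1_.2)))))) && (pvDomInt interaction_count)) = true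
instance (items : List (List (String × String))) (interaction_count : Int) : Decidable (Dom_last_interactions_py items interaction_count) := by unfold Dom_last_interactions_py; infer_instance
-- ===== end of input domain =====

-- B: one backward scan with countdown and early break instead of materializing the full list of user indexes (alternative decomposition, same asymptotic cost).

-- ===== PORT A =====
-- item.get("role") on the association-list dict: first match
def pvGetRole (item : List (String × String)) : Option String :=
  (PySem.Dict.mk item).get? "role"

def last_interactions_py (items : List (List (String × String))) (interaction_count : Int) : List (List (String × String)) :=
  if items = [] then []
  else
    let count : Int := max 1 interaction_count
    let user_indexes : List Int :=
      ((PySem.List.enumerate items 0).filter (fun p => pvGetRole p.2 == some "user")).map (·.1)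
    if user_indexes = [] then
      let keep_messages : Int := min (PySem.List.len items) (count * 2)
      PySem.List.slice items (some (-keep_messages)) none
    else
      let start_user_pos : Int := max 0 (PySem.List.len user_indexes - count)
      let start_index : Int := PySem.List.pyGetD user_indexes start_user_pos 0
      PySem.List.slice items (some start_index) none

-- ===== PORT B =====
-- the backward for-loop of Source B: start/remaining state, break when remaining hits 0
def pvScanBack (rev : List (Int × List (String × String))) (remaining : Int) (start? : Option Int) : Option Int :=
  match rev with
  | [] => start?
  | (i, item) :: rest =>
    if pvGetRole item == some "user" then
      if remaining - 1 = 0 then some i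
      else pvScanBack rest (remaining - 1) (some i)
    else pvScanBack rest remaining start?

def last_interactions_py_alt (items : List (List (String × String))) (interaction_count : Int) : List (List (String × String)) :=
  if items = [] then []
  else
    let count : Int := max 1 interaction_count
    match pvScanBack ((PySem.List.enumerate items 0).reverse) count none with
    | none =>
      PySem.List.slice items (some (PySem.List.len items - min (PySem.List.len items) (count * 2))) none
    | some start => PySem.List.slice items (some start) none

-- ===== PRECONDITION & SPEC =====
def Spec_last_interactions_py (items : List (List (String × String))) (interaction_count : Int) (out : List (List (String × String))) : Prop := out = last_interactions_py_alt items interaction_count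
instance (items : List (List (String × String))) (interaction_count : Int) (out : List (List (String × String))) : Decidable (Spec_last_interactions_py items interaction_count out) := by unfold Spec_last_interactions_py; infer_instance

-- ===== CLAIM (what is proved, stated in full; the proofs are below) =====
def Claim_equal_last_interactions_py : Prop := ∀ (items : List (List (String × String))) (interaction_count : Int), Dom_last_interactions_py items interaction_count → Spec_last_interactions_py items interaction_count (last_interactions_py items interaction_count)

-- ===== LEMMAS AND PROOFS =====

-- characterization of the backward scan: with r+1 "remaining", it returns the (r+1)-th user
-- index in scan order if there is one, else the last user index seen, else the incoming start
theorem pvScanBack_spec (R : List (Int × List (String × String))) :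
    ∀ (r : Nat) (start? : Option Int),
    pvScanBack R (((r + 1 : Nat) : Int)) start? =
      (let us := (R.filter (fun p => pvGetRole p.2 == some "user")).map (·.1)
       if r < us.length then us[r]? else us.getLast?.or start?) := by
  induction R with
  | nil => intro r start?; simp [pvScanBack]
  | cons hd tl ih =>
    intro r start?
    obtain ⟨i, item⟩ := hd
    simp only [pvScanBack]
    by_cases hu : pvGetRole item == some "user"
    · simp only [hu, if_true, List.filter_cons, List.map_cons]
      cases r with
      | zero => simp
      | succ r' =>
        have hne : ¬ (((r' + 1 + 1 : Nat) : Int) - 1 = 0) := by push_cast; omega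
        rw [if_neg hne]
        have hcast : ((r' + 1 + 1 : Nat) : Int) - 1 = ((r' + 1 : Nat) : Int) := by push_cast; ring
        rw [hcast, ih r' (some i)]
        simp only [List.length_cons, List.getElem?_cons_succ, Nat.add_lt_add_iff_right]
        by_cases hlt : r' < (List.map (fun x => x.1) (List.filter (fun p => pvGetRole p.2 == some "user") tl)).length
        · rw [if_pos hlt, if_pos hlt]
        · rw [if_neg hlt, if_neg hlt]
          cases hus : (List.map (fun x => x.1) (List.filter (fun p => pvGetRole p.2 == some "user") tl)) with
          | nil => simp
          | cons a as =>
            cases hgl : (a :: as).getLast? with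
            | none => simp at hgl
            | some j => simp [List.getLast?_cons_cons, hgl]
    · simp only [hu, List.filter_cons]
      rw [ih r start?]
      simp

-- ===== VERDICT (by name: the statement is the Claim_ definition above) =====
theorem last_interactions_py_spec : Claim_equal_last_interactions_py := by
  unfold Claim_equal_last_interactions_py Spec_last_interactions_py
  intro items interaction_count _
  unfold last_interactions_py last_interactions_py_alt
  by_cases hnil : items = []
  · simp [hnil]
  · simp only [hnil, if_false]
    set count : Int := max 1 interaction_count with hcount
    have hc1 : 1 ≤ count := le_max_left _ _
    have hcr : ((count.toNat - 1 + 1 : Nat) : Int) = count := by omega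
    set E := PySem.List.enumerate items 0 with hE
    set U : List Int := (E.filter (fun p => pvGetRole p.2 == some "user")).map (·.1) with hU
    have hrev : ((E.reverse.filter (fun p => pvGetRole p.2 == some "user")).map (·.1)) = U.reverse := by
      rw [List.filter_reverse, List.map_reverse]
    have hscan := pvScanBack_spec E.reverse (count.toNat - 1) none
    rw [hcr] at hscan
    simp only [hrev, List.length_reverse] at hscan
    by_cases hUnil : U = []
    · -- no user messages: both keep the last min(len, 2*count) messages
      rw [hUnil] at hscan
      simp only [List.reverse_nil, List.length_nil, List.getLast?_nil, Option.none_or,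
        Nat.not_lt_zero, if_false] at hscan
      rw [if_pos hUnil]
      simp only [hscan]
      rw [PySem.List.slice_some_none, PySem.List.slice_some_none]
      congr 1
      have hnlen : PySem.List.len items = (items.length : Int) := by simp
      have hpos : items.length ≠ 0 := by simpa using hnil
      rw [hnlen]
      simp only [PySem.List.clampIdx]
      split_ifs <;> omega
    · -- at least one user message
      rw [if_neg hUnil]
      have hUpos : 0 < U.length := List.length_pos_iff.mpr hUnil
      by_cases hle : count.toNat ≤ U.length
      · -- enough users: the count-th user index from the end
        have hlt : count.toNat - 1 < U.length := by omega
        rw [if_pos hlt] at hscan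
        have hidx : U.length - 1 - (count.toNat - 1) = U.length - count.toNat := by omega
        rw [List.getElem?_reverse hlt, hidx] at hscan
        simp only [hscan]
        have hUlen : PySem.List.len U = (U.length : Int) := by simp [PySem.List.len_eq]
        have hmax : max 0 (PySem.List.len U - count) = ((U.length - count.toNat : Nat) : Int) := by
          rw [hUlen]; omega
        rw [hmax, PySem.List.pyGetD_natCast]
        have hlt2 : U.length - count.toNat < U.length := by omega
        rw [List.getD_eq_getElem U 0 hlt2, List.getElem?_eq_getElem hlt2]
      · -- fewer users than count: the first user index
        rw [if_neg (by omega)] at hscan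
        have hUlen : PySem.List.len U = (U.length : Int) := by simp [PySem.List.len_eq]
        have hmax : max 0 (PySem.List.len U - count) = ((0 : Nat) : Int) := by
          rw [hUlen]; omega
        rw [hmax, PySem.List.pyGetD_natCast]
        cases hUc : U with
        | nil => exact absurd hUc hUnil
        | cons a as =>
          rw [hUc] at hscan
          simp only [List.getLast?_reverse, List.head?_cons, Option.some_or] at hscan
          simp only [hscan]
          simp
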